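-- pv_equiv track=rewrite | github.com/jason890317/random_measurement | tools.py | check_outcome_condition_for_random_case_1
-- ===== SOURCE A (Python) =====
-- def check_outcome_condition_for_random_case_1(counts,high):
--     check = False
--     keys = list(counts[0].keys())[0][::-1]
--     high_index = high[0][0]
--
--     for i, key in enumerate(keys):
--         if key == '0':
--             if i == high_index:
--                 check = True
--             else:
--                 break
--     return check
-- ===== SOURCE B (Python) =====
-- def check_outcome_condition_for_random_case_1(counts, high):
--     # A returns True iff the first '0' of the reversed key sits at high_index,
--     # i.e. iff the suffix of the ORIGINAL key after its last '0' has length high_index.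
--     key = next(iter(counts[0]))
--     _, sep, tail = key.rpartition('0')
--     return sep == '0' and len(tail) == high[0][0]
-- ===== Notes on version B (the rewrite author's own statement) =====
-- stated objective: simpler
-- what changed: B never reverses the string and never scans it from the front with a break: it rpartitions the original key at its LAST '0' and compares the length of the suffix after it with high_index, which equals A's first-'0'-in-reversed-key test.
import Mathlib
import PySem

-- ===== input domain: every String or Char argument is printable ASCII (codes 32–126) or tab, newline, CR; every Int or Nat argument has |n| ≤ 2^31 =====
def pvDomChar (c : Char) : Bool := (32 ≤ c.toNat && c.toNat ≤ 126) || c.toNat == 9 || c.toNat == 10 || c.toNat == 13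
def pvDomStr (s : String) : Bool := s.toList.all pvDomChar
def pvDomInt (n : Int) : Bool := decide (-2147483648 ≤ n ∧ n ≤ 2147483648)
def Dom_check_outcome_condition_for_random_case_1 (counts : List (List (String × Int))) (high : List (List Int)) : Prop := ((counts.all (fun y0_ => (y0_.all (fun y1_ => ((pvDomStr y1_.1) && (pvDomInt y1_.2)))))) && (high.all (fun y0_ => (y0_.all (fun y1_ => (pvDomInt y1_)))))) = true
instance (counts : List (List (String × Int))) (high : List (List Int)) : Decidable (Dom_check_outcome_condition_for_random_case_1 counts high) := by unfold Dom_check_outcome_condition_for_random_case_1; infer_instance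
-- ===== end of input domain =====

-- ===== PORT A =====
-- B replaces A's reverse-then-scan-with-break by an rpartition of the ORIGINAL key at its last '0'.
-- A's for-loop over enumerate(keys) with break, carried state: i, high_index, check.
def pvLoopA : List Char → Nat → Int → Bool → Bool
  | [], _, _, check => check
  | c :: rest, i, hi, check =>
    if c = '0' then
      if (i : Int) = hi then pvLoopA rest (i + 1) hi true
      else check
    else pvLoopA rest (i + 1) hi check

-- list(counts[0].keys())[0] is the key of the first pair of the assoc list (dict insertion order
-- keeps the first occurrence's position), exact; counts[0]/high[0][0] on empty raise (Pre_ excludes).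
def check_outcome_condition_for_random_case_1 (counts : List (List (String × Int))) (high : List (List Int)) : Bool :=
  match counts, high with
  | ((k, _) :: _) :: _, (hi :: _) :: _ => pvLoopA k.toList.reverse 0 hi false
  | _, _ => false

-- ===== PORT B =====
-- key.rpartition('0'): suffix after the LAST '0' of the key, none if the key has no '0';
-- hand port (PySem has no rpartition), exact: recursion prefers a '0' found further right.
def pvRPartTail : List Char → Option (List Char)
  | [] => none
  | c :: rest =>
    match pvRPartTail rest with
    | some t => some t
    | none => if c = '0' then some rest else none

-- next(iter(counts[0])), high[0][0] as head?-chains (none = StopIteration/IndexError, Pre_ excludes).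
def check_outcome_condition_for_random_case_1_alt (counts : List (List (String × Int))) (high : List (List Int)) : Bool :=
  match counts.head? with
  | none => false
  | some d =>
    match d.head? with
    | none => false
    | some kv =>
      match high.head? with
      | none => false
      | some r =>
        match r.head? with
        | none => false
        | some hi =>
          match pvRPartTail kv.1.toList with   -- _, sep, tail = key.rpartition('0')
          | some t => ((t.length : Int) == hi) -- sep == '0' and len(tail) == high_index
          | none => false

-- ===== PRECONDITION & SPEC =====
-- A raises IndexError when counts, counts[0], high or high[0] is empty; excluded.
def Pre_check_outcome_condition_for_random_case_1 (counts : List (List (String × Int))) (high : List (List Int)) : Prop :=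
  0 < counts.length ∧ 0 < counts.headI.length ∧ 0 < high.length ∧ 0 < high.headI.length
instance (counts : List (List (String × Int))) (high : List (List Int)) : Decidable (Pre_check_outcome_condition_for_random_case_1 counts high) := by unfold Pre_check_outcome_condition_for_random_case_1; infer_instance
def pvWitness_check_outcome_condition_for_random_case_1 : (List (List (String × Int))) × List (List Int) := ([[("10", 1)]], [[1]])
def Spec_check_outcome_condition_for_random_case_1 (counts : List (List (String × Int))) (high : List (List Int)) (out : Bool) : Prop := out = check_outcome_condition_for_random_case_1_alt counts high
instance (counts : List (List (String × Int))) (high : List (List Int)) (out : Bool) : Decidable (Spec_check_outcome_condition_for_random_case_1 counts high out) := by unfold Spec_check_outcome_condition_for_random_case_1; infer_instance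

-- ===== CLAIM =====
def Claim_equal_check_outcome_condition_for_random_case_1 : Prop := ∀ (counts : List (List (String × Int))) (high : List (List Int)), Dom_check_outcome_condition_for_random_case_1 counts high → Pre_check_outcome_condition_for_random_case_1 counts high → Spec_check_outcome_condition_for_random_case_1 counts high (check_outcome_condition_for_random_case_1 counts high)

-- ===== LEMMAS AND PROOFS =====
-- Once check is true the loop can only return true (i has passed hi, so no break resets it).
theorem pvLoopA_true (l : List Char) (i : Nat) (hi : Int) (h : hi < (i : Int)) :
    pvLoopA l i hi true = true := by
  induction l generalizing i with
  | nil => rfl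
  | cons c rest ih =>
    simp only [pvLoopA]
    split_ifs with hc he
    · exact ih (i + 1) (by push_cast; omega)
    · rfl
    · exact ih (i + 1) (by push_cast; omega)

-- A's scan returns true iff the first '0' (at offset j from start i) sits exactly at hi.
theorem pvLoopA_eq_index (l : List Char) (i : Nat) (hi : Int) :
    pvLoopA l i hi false =
      (match PySem.List.index? l '0' with
       | some j => (((i + j : Nat) : Int) == hi)
       | none => false) := by
  induction l generalizing i with
  | nil => rfl
  | cons c rest ih =>
    by_cases hc : c = '0'
    · subst hc
      rw [PySem.List.index?_cons_self]
      simp only [pvLoopA]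
      by_cases he : (i : Int) = hi
      · rw [if_pos he, pvLoopA_true rest (i + 1) hi (by push_cast; omega)]
        simp [he]
      · rw [if_neg he]
        simp [he]
    · rw [PySem.List.index?_cons_of_ne rest hc]
      simp only [pvLoopA, if_neg hc]
      rw [ih (i + 1)]
      cases h : PySem.List.index? rest '0' with
      | none => simp
      | some j =>
        simp only [Option.map_some]
        congr 1
        push_cast
        ring_nf

-- The suffix after the last '0' of l has the same length as the prefix of l.reverse before
-- its first '0' — so rpartition's tail length is the first-'0' index of the reversed key.
theorem rpartTail_length (l : List Char) :
    PySem.List.index? l.reverse '0' = (pvRPartTail l).map List.length := by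
  induction l with
  | nil => rfl
  | cons c rest ih =>
    simp only [List.reverse_cons, pvRPartTail]
    cases h : pvRPartTail rest with
    | some t =>
      have hmem : '0' ∈ rest.reverse := by
        rw [← PySem.List.index?_isSome_iff, ih, h]; rfl
      rw [PySem.List.index?_append_of_mem _ hmem, ih, h]
    | none =>
      have hnm : '0' ∉ rest.reverse := by
        rw [← PySem.List.index?_eq_none_iff, ih, h]; rfl
      by_cases hc : c = '0'
      · subst hc
        rw [PySem.List.index?_append_singleton_self rest.reverse '0' hnm]
        simp
      · have h1 : PySem.List.index? (rest.reverse ++ [c]) '0' = none := by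
          rw [PySem.List.index?_eq_none_iff]
          simp [hnm, Ne.symm hc]
        rw [h1]
        simp [hc]

-- ===== VERDICT =====
theorem check_outcome_condition_for_random_case_1_spec : Claim_equal_check_outcome_condition_for_random_case_1 := by
  intro counts high _ hpre
  unfold Spec_check_outcome_condition_for_random_case_1
  match counts, high with
  | ((k, v) :: cs) :: cc, (hi :: hs) :: hh =>
    simp only [check_outcome_condition_for_random_case_1,
      check_outcome_condition_for_random_case_1_alt, List.head?]
    rw [pvLoopA_eq_index, rpartTail_length]
    cases pvRPartTail k.toList with
    | none => simp
    | some t => simp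
  | [], _ => exact absurd hpre.1 (by simp)
  | [] :: _, _ => exact absurd hpre.2.1 (by simp [List.headI])
  | (_ :: _) :: _, [] => exact absurd hpre.2.2.1 (by simp)
  | (_ :: _) :: _, [] :: _ => exact absurd hpre.2.2.2 (by simp [List.headI])
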